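-- pv_equiv track=rewrite | github.com/zonca/software_citation | softare_citation_station/generate_citation.py | split_bibtex_fields
-- ===== SOURCE A (Python) =====
-- from typing import Dict, Iterable, List
--
-- def split_bibtex_fields(fields_part: str) -> List[str]:
--     parts: List[str] = []
--     current: List[str] = []
--     brace_depth = 0
--     in_quotes = False
--     i = 0
--     while i < len(fields_part):
--         char = fields_part[i]
--         if char == '"':
--             in_quotes = not in_quotes
--         elif char == "{":
--             brace_depth += 1
--         elif char == "}":
--             brace_depth = max(brace_depth - 1, 0)
--
--         if char == "," and brace_depth == 0 and not in_quotes: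
--             part = "".join(current).strip()
--             if part:
--                 parts.append(part)
--             current = []
--         else:
--             current.append(char)
--         i += 1
--
--     remainder = "".join(current).strip()
--     if remainder:
--         parts.append(remainder)
--     return parts
-- ===== SOURCE B (Python) =====
-- def split_bibtex_fields(fields_part):
--     # Pass 1: record the index of every separator comma (top-level, unquoted).
--     bounds = []
--     depth = 0
--     in_quotes = False
--     for i, ch in enumerate(fields_part):
--         if ch == '"':
--             in_quotes = not in_quotes
--         elif ch == "{":
--             depth += 1
--         elif ch == "}":
--             depth = max(depth - 1, 0)
--         if ch == "," and depth == 0 and not in_quotes: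
--             bounds.append(i)
--     # Pass 2: slice the string at those positions, strip, keep non-empty fields.
--     parts = []
--     prev = 0
--     for b in bounds:
--         seg = fields_part[prev:b].strip()
--         if seg:
--             parts.append(seg)
--         prev = b + 1
--     seg = fields_part[prev:].strip()
--     if seg:
--         parts.append(seg)
--     return parts
-- ===== Notes on version B (the rewrite author's own statement) =====
-- stated objective: faster
-- what changed: B separates boundary-finding from field extraction: one scan records the indices of top-level separator commas, then fields are obtained by slicing the string between consecutive boundaries and stripping; bulk slicing replaces A's per-character list appends and joins (measured ~2.7x at the largest size).
import Mathlib
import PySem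

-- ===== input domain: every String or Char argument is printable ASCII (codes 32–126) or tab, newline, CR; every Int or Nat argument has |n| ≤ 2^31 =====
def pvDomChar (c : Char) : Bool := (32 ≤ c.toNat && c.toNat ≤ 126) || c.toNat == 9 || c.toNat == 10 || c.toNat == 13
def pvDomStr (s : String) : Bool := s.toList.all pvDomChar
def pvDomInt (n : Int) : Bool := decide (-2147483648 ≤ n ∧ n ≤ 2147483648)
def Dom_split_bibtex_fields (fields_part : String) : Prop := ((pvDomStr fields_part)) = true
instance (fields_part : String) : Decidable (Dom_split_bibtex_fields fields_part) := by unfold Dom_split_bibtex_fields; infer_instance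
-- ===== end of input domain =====

-- B records separator-comma positions in one scan and then slices the string between
-- them, instead of A's single loop flushing a character accumulator; a timing run
-- measured B faster by a constant factor. Equivalence of the return values is proved.

-- the shared if/elif update of the quote flag and (clamped) brace depth
def pvStepQ (q : Bool) (c : Char) : Bool := if c = '"' then !q else q
def pvStepD (d : Int) (c : Char) : Int :=
  if c = '"' then d else if c = '{' then d + 1 else if c = '}' then max (d - 1) 0 else d

-- ===== PORT A =====
-- A's while loop: state (parts, current accumulator, depth, quotes), one char per step
def pvAgo : List Char → List String → List Char → Int → Bool → List String
  | [], parts, current, _, _ =>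
      if PySem.Str.strip (String.ofList current) ≠ "" then
        parts ++ [PySem.Str.strip (String.ofList current)]
      else parts
  | c :: rest, parts, current, d, q =>
      if c = ',' ∧ pvStepD d c = 0 ∧ pvStepQ q c = false then
        pvAgo rest
          (if PySem.Str.strip (String.ofList current) ≠ "" then
             parts ++ [PySem.Str.strip (String.ofList current)]
           else parts)
          [] (pvStepD d c) (pvStepQ q c)
      else
        pvAgo rest parts (current ++ [c]) (pvStepD d c) (pvStepQ q c)

def split_bibtex_fields (fields_part : String) : List String :=
  pvAgo fields_part.toList [] [] 0 false

-- ===== PORT B =====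
-- pass 1: indices of the top-level unquoted separator commas (enumerate with counter i)
def pvBounds : List Char → Nat → Int → Bool → List Nat
  | [], _, _, _ => []
  | c :: rest, i, d, q =>
      if c = ',' ∧ pvStepD d c = 0 ∧ pvStepQ q c = false then
        i :: pvBounds rest (i + 1) (pvStepD d c) (pvStepQ q c)
      else
        pvBounds rest (i + 1) (pvStepD d c) (pvStepQ q c)

-- pass 2: slice fields_part between consecutive boundaries, strip, keep non-empty.
-- fields_part[prev:b] with 0 ≤ prev ≤ b ≤ len is exactly (toList.drop prev).take (b - prev);
-- fields_part[prev:] is toList.drop prev.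
def pvSegs (cs : List Char) : List Nat → Nat → List String
  | [], prev =>
      if PySem.Str.strip (String.ofList (cs.drop prev)) ≠ "" then
        [PySem.Str.strip (String.ofList (cs.drop prev))]
      else []
  | b :: bs, prev =>
      if PySem.Str.strip (String.ofList ((cs.drop prev).take (b - prev))) ≠ "" then
        PySem.Str.strip (String.ofList ((cs.drop prev).take (b - prev))) :: pvSegs cs bs (b + 1)
      else pvSegs cs bs (b + 1)

def split_bibtex_fields_alt (fields_part : String) : List String :=
  pvSegs fields_part.toList (pvBounds fields_part.toList 0 0 false) 0

-- ===== PRECONDITION & SPEC =====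
def Spec_split_bibtex_fields (fields_part : String) (out : List String) : Prop := out = split_bibtex_fields_alt fields_part
instance (fields_part : String) (out : List String) : Decidable (Spec_split_bibtex_fields fields_part out) := by unfold Spec_split_bibtex_fields; infer_instance

-- ===== CLAIM (what is proved, stated in full; the proofs are below) =====
def Claim_equal_split_bibtex_fields : Prop := ∀ (fields_part : String), Dom_split_bibtex_fields fields_part → Spec_split_bibtex_fields fields_part (split_bibtex_fields fields_part)

-- ===== LEMMAS AND PROOFS =====

-- extending the processed prefix by one character extends the accumulator slice
lemma pv_take_snoc (cs : List Char) (prev i : Nat) (c : Char)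
    (hpi : prev ≤ i) (h : cs.drop i = c :: (cs.drop (i + 1))) :
    (cs.drop prev).take (i - prev) ++ [c] = (cs.drop prev).take (i + 1 - prev) := by
  have hc : cs[i]? = some c := by
    have h0 : (cs.drop i)[0]? = cs[i + 0]? := List.getElem?_drop ..
    simpa [h] using h0.symm
  have hidx : (cs.drop prev)[i - prev]? = some c := by
    rw [List.getElem?_drop, Nat.add_sub_cancel' hpi]
    exact hc
  have : i + 1 - prev = (i - prev) + 1 := by omega
  rw [this, List.take_add_one, hidx]
  simp

-- drop i = c :: rest forces rest = drop (i+1)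
lemma pv_drop_succ (cs : List Char) (i : Nat) (c : Char) (rest : List Char)
    (h : cs.drop i = c :: rest) : cs.drop (i + 1) = rest := by
  have : cs.drop (i + 1) = (cs.drop i).drop 1 := by
    rw [List.drop_drop]
  rw [this, h]
  simp

-- main invariant: A's loop on the suffix cs.drop i, with accumulator = the slice
-- [prev, i), produces exactly parts ++ the B-segments of the boundaries found ahead
lemma pv_main (cs : List Char) :
    ∀ (tail : List Char) (i prev : Nat) (d : Int) (q : Bool) (parts : List String),
      prev ≤ i → tail = cs.drop i →
      pvAgo tail parts ((cs.drop prev).take (i - prev)) d q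
        = parts ++ pvSegs cs (pvBounds tail i d q) prev := by
  intro tail
  induction tail with
  | nil =>
      intro i prev d q parts hpi htail
      have hlen : cs.length ≤ i := by
        by_contra hn
        have : cs.drop i ≠ [] := by
          simp [List.drop_eq_nil_iff]
          omega
        exact this htail.symm
      have hfull : (cs.drop prev).take (i - prev) = cs.drop prev := by
        apply List.take_of_length_le
        simp
        omega
      simp only [pvAgo, pvBounds, pvSegs, hfull]
      split <;> simp
  | cons c rest ih =>
      intro i prev d q parts hpi htail
      have hrest : cs.drop (i + 1) = rest := pv_drop_succ cs i c rest htail.symm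
      simp only [pvAgo, pvBounds]
      split
      · -- separator comma: flush and continue with empty accumulator from i+1
        have hz : ((cs.drop (i + 1)).take (i + 1 - (i + 1)) : List Char) = [] := by simp
        have := ih (i + 1) (i + 1) (pvStepD d c) (pvStepQ q c)
          (if PySem.Str.strip (String.ofList ((cs.drop prev).take (i - prev))) ≠ "" then
             parts ++ [PySem.Str.strip (String.ofList ((cs.drop prev).take (i - prev)))]
           else parts)
          (le_refl _) hrest.symm
        rw [hz] at this
        rw [this]
        simp only [pvSegs]
        split <;> simp
      · -- ordinary character: accumulator gains c, i.e. the slice grows by one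
        have hsnoc : (cs.drop prev).take (i - prev) ++ [c]
            = (cs.drop prev).take (i + 1 - prev) := by
          apply pv_take_snoc cs prev i c hpi
          rw [hrest]; exact htail.symm
        rw [hsnoc]
        exact ih (i + 1) prev (pvStepD d c) (pvStepQ q c) parts (by omega) hrest.symm

-- ===== VERDICT (by name: the statement is the Claim_ definition above) =====
theorem split_bibtex_fields_spec : Claim_equal_split_bibtex_fields := by
  intro s _
  unfold Spec_split_bibtex_fields split_bibtex_fields split_bibtex_fields_alt
  have h := pv_main s.toList s.toList 0 0 0 false [] (le_refl 0) (by simp)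
  simpa using h
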